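-- pv_equiv track=rewrite | github.com/VeerDev-hub/Port-Scanner | validators.py | parse_port_targets
-- ===== SOURCE A (Python) =====
-- def parse_port_targets(port_range_raw=None, ports_count_raw=None):
--     """
--     Supports:
--     - range/list expression: "1-1024,3306,8080"
--     - fallback count mode: first N ports (1..N)
--     """
--     port_range_text = (str(port_range_raw or "")).strip()
--     if port_range_text:
--         ports = set()
--         chunks = [c.strip() for c in port_range_text.split(",") if c.strip()]
--         if not chunks:
--             raise ValueError("Empty port range")
--
--         for chunk in chunks:
--             if "-" in chunk:
--                 parts = [p.strip() for p in chunk.split("-", 1)]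
--                 if len(parts) != 2 or not parts[0] or not parts[1]:
--                     raise ValueError(f"Invalid range segment: {chunk}")
--                 start = int(parts[0])
--                 end = int(parts[1])
--                 if start > end:
--                     raise ValueError(f"Range start must be <= end: {chunk}")
--                 if start < 1 or end > 65535:
--                     raise ValueError(f"Port out of bounds in range: {chunk}")
--                 ports.update(range(start, end + 1))
--             else:
--                 port = int(chunk)
--                 if port < 1 or port > 65535:
--                     raise ValueError(f"Port out of bounds: {chunk}")
--                 ports.add(port)
--
--         ordered = sorted(ports)
--         if not ordered:
--             raise ValueError("No valid ports parsed")
--         return ordered, port_range_text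
--
--     try:
--         ports_to_scan = int(ports_count_raw if ports_count_raw is not None else 100)
--     except Exception as exc:
--         raise ValueError("Invalid ports value") from exc
--     ports_to_scan = max(1, min(65535, ports_to_scan))
--     return list(range(1, ports_to_scan + 1)), f"1-{ports_to_scan}"
-- ===== SOURCE B (Python) =====
-- def _chunk_interval(chunk):
--     """Validate one chunk and return its (lo, hi) port interval."""
--     if "-" in chunk:
--         i = chunk.find("-")
--         lo_txt = chunk[:i].strip()
--         hi_txt = chunk[i + 1:].strip()
--         if not lo_txt or not hi_txt:
--             raise ValueError(f"Invalid range segment: {chunk}")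
--         lo = int(lo_txt)
--         hi = int(hi_txt)
--         if lo > hi:
--             raise ValueError(f"Range start must be <= end: {chunk}")
--         if lo < 1 or hi > 65535:
--             raise ValueError(f"Port out of bounds in range: {chunk}")
--         return lo, hi
--     port = int(chunk)
--     if port < 1 or port > 65535:
--         raise ValueError(f"Port out of bounds: {chunk}")
--     return port, port
--
--
-- def parse_port_targets(port_range_raw=None, ports_count_raw=None):
--     """Interval re-implementation: one (lo, hi) interval per chunk (parsed with
--     find/slices rather than split), intervals sorted by start and merged/expanded
--     in one linear pass; no set of ports, no final sort of ports."""
--     port_range_text = (str(port_range_raw or "")).strip()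
--     if port_range_text:
--         chunks = [c.strip() for c in port_range_text.split(",") if c.strip()]
--         if not chunks:
--             raise ValueError("Empty port range")
--
--         intervals = sorted((_chunk_interval(c) for c in chunks), key=lambda iv: iv[0])
--         cur_lo, cur_hi = intervals[0]
--         ordered = []
--         for lo, hi in intervals[1:]:
--             if lo <= cur_hi + 1:
--                 if hi > cur_hi:
--                     cur_hi = hi
--             else:
--                 ordered.extend(range(cur_lo, cur_hi + 1))
--                 cur_lo, cur_hi = lo, hi
--         ordered.extend(range(cur_lo, cur_hi + 1))
--         return ordered, port_range_text
--
--     try: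
--         ports_to_scan = int(ports_count_raw if ports_count_raw is not None else 100)
--     except Exception as exc:
--         raise ValueError("Invalid ports value") from exc
--     ports_to_scan = max(1, min(65535, ports_to_scan))
--     return list(range(1, ports_to_scan + 1)), f"1-{ports_to_scan}"
-- ===== Notes on version B (the rewrite author's own statement) =====
-- stated objective: faster
-- what changed: Instead of accumulating every individual port into a set and sorting them all, B parses each chunk (with find/slices rather than split) into one (lo,hi) interval via a helper, sorts the k intervals by start and merges-and-expands them in one linear pass; count-mode branch unchanged.
import Mathlib
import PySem

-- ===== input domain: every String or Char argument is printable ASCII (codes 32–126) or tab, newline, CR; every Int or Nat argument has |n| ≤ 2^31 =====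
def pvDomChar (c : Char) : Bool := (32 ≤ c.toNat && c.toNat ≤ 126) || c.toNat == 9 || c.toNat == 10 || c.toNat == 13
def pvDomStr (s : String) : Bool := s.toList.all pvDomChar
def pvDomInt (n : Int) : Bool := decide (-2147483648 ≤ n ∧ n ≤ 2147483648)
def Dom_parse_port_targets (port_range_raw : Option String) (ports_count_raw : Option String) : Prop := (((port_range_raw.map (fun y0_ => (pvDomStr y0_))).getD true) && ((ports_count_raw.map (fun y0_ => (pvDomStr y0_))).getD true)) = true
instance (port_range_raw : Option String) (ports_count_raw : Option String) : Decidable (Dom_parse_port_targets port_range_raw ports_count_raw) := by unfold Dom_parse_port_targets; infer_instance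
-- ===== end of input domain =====

set_option maxHeartbeats 1000000


-- B replaces A's "set of every port, then sort all ports" by one (lo, hi) interval per
-- chunk (parsed via find/slices in a helper instead of split), the k intervals sorted by
-- start and merged/expanded in one linear pass; the count-mode fallback is unchanged.

-- ===== PORT A =====
-- the for-loop over chunks; `none` = one of A's `raise ValueError`s fired
def pvLoopA (chunks : List String) (ports : PySem.Set Int) : Option (PySem.Set Int) :=
  match chunks with
  | [] => some ports
  | chunk :: rest =>
    if PySem.Str.isIn "-" chunk then
      if (((PySem.Str.splitMax? chunk "-" 1).getD []).map PySem.Str.strip).length ≠ 2 ∨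
         (((PySem.Str.splitMax? chunk "-" 1).getD []).map PySem.Str.strip).getD 0 "" = "" ∨
         (((PySem.Str.splitMax? chunk "-" 1).getD []).map PySem.Str.strip).getD 1 "" = "" then none
      else
        match PySem.Int.ofStr? ((((PySem.Str.splitMax? chunk "-" 1).getD []).map PySem.Str.strip).getD 0 ""),
              PySem.Int.ofStr? ((((PySem.Str.splitMax? chunk "-" 1).getD []).map PySem.Str.strip).getD 1 "") with
        | some start, some «end» =>
          if start > «end» then none
          else if start < 1 ∨ «end» > 65535 then none
          else pvLoopA rest (PySem.Set.update ports (PySem.List.pyRange start («end» + 1) 1))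
        | _, _ => none
    else
      match PySem.Int.ofStr? chunk with
      | some port =>
        if port < 1 ∨ port > 65535 then none
        else pvLoopA rest (PySem.Set.add ports port)
      | none => none

def parse_port_targets (port_range_raw : Option String) (ports_count_raw : Option String) : List Int × String :=
  let port_range_text := PySem.Str.strip (port_range_raw.getD "")
  if port_range_text ≠ "" then
    let chunks := (((PySem.Str.split? port_range_text ",").getD []).map PySem.Str.strip).filter (fun c => c ≠ "")
    if chunks = [] then ([], "")  -- raise ValueError("Empty port range")
    else
      match pvLoopA chunks PySem.Set.empty with
      | none => ([], "")          -- a ValueError raised inside the loop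
      | some ports =>
        if PySem.List.sorted ports (fun x => x) false = [] then ([], "")  -- raise ValueError("No valid ports parsed")
        else (PySem.List.sorted ports (fun x => x) false, port_range_text)
  else
    match ports_count_raw with
    | none =>
      (PySem.List.pyRange 1 (max 1 (min 65535 (100 : Int)) + 1) 1,
       "1-" ++ PySem.Int.toStr (max 1 (min 65535 (100 : Int))))
    | some s =>
      match PySem.Int.ofStr? s with
      | none => ([], "")          -- raise ValueError("Invalid ports value")
      | some n0 =>
        (PySem.List.pyRange 1 (max 1 (min 65535 n0) + 1) 1,
         "1-" ++ PySem.Int.toStr (max 1 (min 65535 n0)))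

-- ===== PORT B =====
-- Source B's `_chunk_interval`: validate one chunk, return its (lo, hi) interval
-- (`none` = one of the `raise ValueError`s fired); the dashed case slices the
-- chunk at the first "-" (chunk.find) instead of splitting
def pvChunkIv? (chunk : String) : Option (Int × Int) :=
  if PySem.Str.isIn "-" chunk then
    if PySem.Str.strip (PySem.Str.slice chunk none (some (PySem.Str.find chunk "-"))) = "" ∨
       PySem.Str.strip (PySem.Str.slice chunk (some (PySem.Str.find chunk "-" + 1)) none) = "" then none
    else
      match PySem.Int.ofStr? (PySem.Str.strip (PySem.Str.slice chunk none (some (PySem.Str.find chunk "-")))),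
            PySem.Int.ofStr? (PySem.Str.strip (PySem.Str.slice chunk (some (PySem.Str.find chunk "-" + 1)) none)) with
      | some lo, some hi =>
        if lo > hi then none
        else if lo < 1 ∨ hi > 65535 then none
        else some (lo, hi)
      | _, _ => none
  else
    match PySem.Int.ofStr? chunk with
    | some port => if port < 1 ∨ port > 65535 then none else some (port, port)
    | none => none

-- the merge-and-expand loop over the tail of the sorted interval list
-- (state: cur_lo, cur_hi, ordered), plus the trailing `ordered.extend(...)`
def pvMergeB (t : List (Int × Int)) (cur_lo cur_hi : Int) (ordered : List Int) : List Int :=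
  match t with
  | [] => ordered ++ PySem.List.pyRange cur_lo (cur_hi + 1) 1
  | (lo, hi) :: rest =>
    if lo ≤ cur_hi + 1 then
      pvMergeB rest cur_lo (if hi > cur_hi then hi else cur_hi) ordered
    else
      pvMergeB rest lo hi (ordered ++ PySem.List.pyRange cur_lo (cur_hi + 1) 1)

def parse_port_targets_alt (port_range_raw : Option String) (ports_count_raw : Option String) : List Int × String :=
  let port_range_text := PySem.Str.strip (port_range_raw.getD "")
  if port_range_text ≠ "" then
    let chunks := (((PySem.Str.split? port_range_text ",").getD []).map PySem.Str.strip).filter (fun c => c ≠ "")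
    if chunks = [] then ([], "")  -- raise ValueError("Empty port range")
    else
      -- `sorted((_chunk_interval(c) for c in chunks), key=lambda iv: iv[0])`
      match chunks.mapM pvChunkIv? with
      | none => ([], "")          -- a ValueError raised inside _chunk_interval
      | some ivs =>
        match PySem.List.sorted ivs (fun iv => iv.1) false with
        | [] => ([], "")          -- unreachable here: intervals[0] would be IndexError
        | (lo0, hi0) :: rest => (pvMergeB rest lo0 hi0 [], port_range_text)
  else
    match ports_count_raw with
    | none =>
      (PySem.List.pyRange 1 (max 1 (min 65535 (100 : Int)) + 1) 1,
       "1-" ++ PySem.Int.toStr (max 1 (min 65535 (100 : Int))))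
    | some s =>
      match PySem.Int.ofStr? s with
      | none => ([], "")          -- raise ValueError("Invalid ports value")
      | some n0 =>
        (PySem.List.pyRange 1 (max 1 (min 65535 n0) + 1) 1,
         "1-" ++ PySem.Int.toStr (max 1 (min 65535 n0)))

-- ===== PRECONDITION & SPEC =====
-- Pre_ excludes exactly the inputs on which A raises ValueError: a nonempty expression all
-- of whose comma-pieces are blank, a malformed / non-integer / out-of-bounds / reversed
-- chunk, or (count mode) a ports_count string that is not an int literal.
def pvChunkOK (chunk : String) : Bool :=
  if PySem.Str.isIn "-" chunk then
    (((PySem.Str.splitMax? chunk "-" 1).getD []).map PySem.Str.strip).length = 2 &&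
    (((PySem.Str.splitMax? chunk "-" 1).getD []).map PySem.Str.strip).getD 0 "" ≠ "" &&
    (((PySem.Str.splitMax? chunk "-" 1).getD []).map PySem.Str.strip).getD 1 "" ≠ "" &&
      (match PySem.Int.ofStr? ((((PySem.Str.splitMax? chunk "-" 1).getD []).map PySem.Str.strip).getD 0 ""),
             PySem.Int.ofStr? ((((PySem.Str.splitMax? chunk "-" 1).getD []).map PySem.Str.strip).getD 1 "") with
       | some start, some «end» => start ≤ «end» && 1 ≤ start && «end» ≤ 65535
       | _, _ => false)
  else
    match PySem.Int.ofStr? chunk with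
    | some port => 1 ≤ port && port ≤ 65535
    | none => false

def Pre_parse_port_targets (port_range_raw : Option String) (ports_count_raw : Option String) : Prop :=
  (let port_range_text := PySem.Str.strip (port_range_raw.getD "")
   if port_range_text ≠ "" then
     let chunks := (((PySem.Str.split? port_range_text ",").getD []).map PySem.Str.strip).filter (fun c => c ≠ "")
     chunks ≠ [] && chunks.all pvChunkOK
   else
     match ports_count_raw with
     | none => true
     | some s => (PySem.Int.ofStr? s).isSome) = true

instance (port_range_raw : Option String) (ports_count_raw : Option String) : Decidable (Pre_parse_port_targets port_range_raw ports_count_raw) := by unfold Pre_parse_port_targets; infer_instance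

def pvWitness_parse_port_targets : Option String × Option String := (some "1-5, 3, 8-10,4", none)

def Spec_parse_port_targets (port_range_raw : Option String) (ports_count_raw : Option String) (out : List Int × String) : Prop := out = parse_port_targets_alt port_range_raw ports_count_raw
instance (port_range_raw : Option String) (ports_count_raw : Option String) (out : List Int × String) : Decidable (Spec_parse_port_targets port_range_raw ports_count_raw out) := by unfold Spec_parse_port_targets; infer_instance

-- ===== CLAIM (what is proved, stated in full; the proofs are below) =====
def Claim_equal_parse_port_targets : Prop := ∀ (port_range_raw : Option String) (ports_count_raw : Option String), Dom_parse_port_targets port_range_raw ports_count_raw → Pre_parse_port_targets port_range_raw ports_count_raw → Spec_parse_port_targets port_range_raw ports_count_raw (parse_port_targets port_range_raw ports_count_raw)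

-- ===== LEMMAS AND PROOFS =====

-- the interval a valid chunk denotes (proof-side only)
def pvIv (chunk : String) : Int × Int :=
  if PySem.Str.isIn "-" chunk then
    ((PySem.Int.ofStr? ((((PySem.Str.splitMax? chunk "-" 1).getD []).map PySem.Str.strip).getD 0 "")).getD 0,
     (PySem.Int.ofStr? ((((PySem.Str.splitMax? chunk "-" 1).getD []).map PySem.Str.strip).getD 1 "")).getD 0)
  else
    ((PySem.Int.ofStr? chunk).getD 0, (PySem.Int.ofStr? chunk).getD 0)

-- `find.go` counts from its offset: shifting the offset shifts a found result
theorem pv_findgo_shift (sep : List Char) : ∀ (l : List Char) (k : Nat), sep <:+: l →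
    PySem.Chars.find.go sep l k = k + PySem.Chars.find.go sep l 0 := by
  intro l
  induction l with
  | nil =>
    intro k h
    have : sep = [] := List.eq_nil_of_infix_nil h
    simp [PySem.Chars.find.go, this]
  | cons c t ih =>
    intro k h
    by_cases hp : sep.isPrefixOf (c :: t) = true
    · simp [PySem.Chars.find.go, hp]
    · have ht : sep <:+: t := by
        rcases List.infix_cons_iff.mp h with h' | h'
        · exact absurd (List.isPrefixOf_iff_prefix.mpr h') hp
        · exact h'
      simp only [PySem.Chars.find.go, hp, if_false, Bool.false_eq_true]
      rw [ih (k + 1) ht, ih 1 ht]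
      push_cast; ring

-- `splitOnMax.go` with maxsplit exhausted returns the remainder as the last piece
theorem pv_splitgo_zero (sep : List Char) (f : Nat) (l cur : List Char) (acc : List (List Char)) :
    PySem.Chars.splitOnMax.go sep (f + 1) 0 l cur acc = ((cur.reverse ++ l) :: acc).reverse := by
  cases l <;> simp [PySem.Chars.splitOnMax.go]

-- `splitOnMax.go … 1` on a list containing the (one-char) separator: cut at the first occurrence
theorem pv_splitgo_one : ∀ (l : List Char) (f : Nat) (cur : List Char) (acc : List (List Char)),
    l.length < f → ['-'] <:+: l →
    PySem.Chars.splitOnMax.go ['-'] f 1 l cur acc =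
      acc.reverse ++ [cur.reverse ++ l.take (PySem.Chars.find l ['-']).toNat,
                      l.drop ((PySem.Chars.find l ['-']).toNat + 1)] := by
  intro l
  induction l with
  | nil =>
    intro f cur acc _ h
    exact absurd (List.eq_nil_of_infix_nil h) (by simp)
  | cons c t ih =>
    intro f cur acc hf h
    obtain ⟨f', rfl⟩ : ∃ f', f = f' + 1 := ⟨f - 1, by omega⟩
    have hf' : t.length < f' := by simpa using hf
    by_cases hp : List.isPrefixOf ['-'] (c :: t) = true
    · obtain ⟨f'', rfl⟩ : ∃ f'', f' = f'' + 1 := ⟨f' - 1, by omega⟩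
      have hfind : PySem.Chars.find (c :: t) ['-'] = 0 := by
        simp [PySem.Chars.find, PySem.Chars.find.go, hp]
      have hstep : PySem.Chars.splitOnMax.go ['-'] (f'' + 1 + 1) 1 (c :: t) cur acc
          = PySem.Chars.splitOnMax.go ['-'] (f'' + 1) 0 t [] (cur.reverse :: acc) := by
        simp [PySem.Chars.splitOnMax.go, hp]
      rw [hstep, pv_splitgo_zero, hfind]
      simp
    · have ht : ['-'] <:+: t := by
        rcases List.infix_cons_iff.mp h with h' | h'
        · exact absurd (List.isPrefixOf_iff_prefix.mpr h') hp
        · exact h'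
      have hnn : 0 ≤ PySem.Chars.find t ['-'] := (PySem.Chars.find_nonneg_iff t ['-']).mpr ht
      have hfind : PySem.Chars.find (c :: t) ['-'] = 1 + PySem.Chars.find t ['-'] := by
        show PySem.Chars.find.go ['-'] (c :: t) 0 = _
        simp only [PySem.Chars.find.go, hp, if_false, Bool.false_eq_true]
        exact pv_findgo_shift ['-'] t 1 ht
      have hstep : PySem.Chars.splitOnMax.go ['-'] (f' + 1) 1 (c :: t) cur acc
          = PySem.Chars.splitOnMax.go ['-'] f' 1 t (c :: cur) acc := by
        simp [PySem.Chars.splitOnMax.go, hp]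
      rw [hstep, ih f' (c :: cur) acc hf' ht, hfind]
      have htn : (1 + PySem.Chars.find t ['-']).toNat = (PySem.Chars.find t ['-']).toNat + 1 := by omega
      rw [htn]
      simp [List.take_succ_cons, List.drop_succ_cons]

-- "-" in c, read on the character list
theorem pv_isIn_dash {c : String} (h : PySem.Str.isIn "-" c = true) : ['-'] <:+: c.toList := by
  have hsep : ("-" : String).toList = ['-'] := by decide
  unfold PySem.Str.isIn at h
  rw [hsep] at h
  exact (PySem.Chars.isIn_iff_infix _ _).mp h

-- Chars-level: split at maxsplit 1 cuts at the first occurrence of the separator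
theorem pv_splitOnMax_one (l : List Char) (h : ['-'] <:+: l) :
    PySem.Chars.splitOnMax l ['-'] 1 =
      [l.take (PySem.Chars.find l ['-']).toNat,
       l.drop ((PySem.Chars.find l ['-']).toNat + 1)] := by
  unfold PySem.Chars.splitOnMax
  rw [if_neg (by omega)]
  rw [show ((1 : Int)).toNat = 1 from rfl]
  rw [pv_splitgo_one l (l.length + 1) [] [] (by omega) h]
  simp

-- chunk.split("-", 1) of a chunk containing "-" = [chunk[:i], chunk[i+1:]] at i = chunk.find("-")
theorem pv_splitMax_dash (chunk : String) (h : PySem.Str.isIn "-" chunk = true) :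
    PySem.Str.splitMax? chunk "-" 1 =
      some [String.ofList (chunk.toList.take (PySem.Chars.find chunk.toList ['-']).toNat),
            String.ofList (chunk.toList.drop ((PySem.Chars.find chunk.toList ['-']).toNat + 1))] := by
  have hsep : ("-" : String).toList = ['-'] := by decide
  unfold PySem.Str.splitMax? PySem.Chars.splitMax?
  rw [hsep]
  rw [if_neg (by simp)]
  rw [pv_splitOnMax_one chunk.toList (pv_isIn_dash h)]
  rfl

-- B's sliced-and-stripped pieces are exactly A's stripped split parts
theorem pv_piece0 (chunk : String) (h : PySem.Str.isIn "-" chunk = true) :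
    PySem.Str.strip (PySem.Str.slice chunk none (some (PySem.Str.find chunk "-"))) =
      (((PySem.Str.splitMax? chunk "-" 1).getD []).map PySem.Str.strip).getD 0 "" := by
  have hsep : ("-" : String).toList = ['-'] := by decide
  have hfind : PySem.Str.find chunk "-" = PySem.Chars.find chunk.toList ['-'] := by
    unfold PySem.Str.find; rw [hsep]
  have hnn : 0 ≤ PySem.Chars.find chunk.toList ['-'] :=
    (PySem.Chars.find_nonneg_iff chunk.toList ['-']).mpr (pv_isIn_dash h)
  rw [pv_splitMax_dash chunk h]
  simp only [Option.getD_some, List.map_cons, List.getD_cons_zero]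
  rw [← String.toList_inj, PySem.Str.toList_strip, PySem.Str.toList_strip,
      PySem.Str.toList_slice, String.toList_ofList, PySem.Chars.slice_eq_listSlice, hfind,
      PySem.List.slice_to _ hnn]

theorem pv_piece1 (chunk : String) (h : PySem.Str.isIn "-" chunk = true) :
    PySem.Str.strip (PySem.Str.slice chunk (some (PySem.Str.find chunk "-" + 1)) none) =
      (((PySem.Str.splitMax? chunk "-" 1).getD []).map PySem.Str.strip).getD 1 "" := by
  have hsep : ("-" : String).toList = ['-'] := by decide
  have hfind : PySem.Str.find chunk "-" = PySem.Chars.find chunk.toList ['-'] := by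
    unfold PySem.Str.find; rw [hsep]
  have hnn : 0 ≤ PySem.Chars.find chunk.toList ['-'] :=
    (PySem.Chars.find_nonneg_iff chunk.toList ['-']).mpr (pv_isIn_dash h)
  rw [pv_splitMax_dash chunk h]
  simp only [Option.getD_some, List.map_cons, List.getD_cons_succ, List.getD_cons_zero]
  rw [← String.toList_inj, PySem.Str.toList_strip, PySem.Str.toList_strip,
      PySem.Str.toList_slice, String.toList_ofList, PySem.Chars.slice_eq_listSlice, hfind,
      PySem.List.slice_from _ (by omega)]
  congr 2
  omega

-- what a successful chunk validation tells us, in the shape the loop lemmas consume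
theorem pvChunkOK_elim {c : String} (hc : pvChunkOK c = true) :
    (∃ s0 e0, PySem.Str.isIn "-" c = true ∧
      ¬ ((((PySem.Str.splitMax? c "-" 1).getD []).map PySem.Str.strip).length ≠ 2 ∨
         (((PySem.Str.splitMax? c "-" 1).getD []).map PySem.Str.strip).getD 0 "" = "" ∨
         (((PySem.Str.splitMax? c "-" 1).getD []).map PySem.Str.strip).getD 1 "" = "") ∧
      PySem.Int.ofStr? ((((PySem.Str.splitMax? c "-" 1).getD []).map PySem.Str.strip).getD 0 "") = some s0 ∧
      PySem.Int.ofStr? ((((PySem.Str.splitMax? c "-" 1).getD []).map PySem.Str.strip).getD 1 "") = some e0 ∧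
      1 ≤ s0 ∧ s0 ≤ e0 ∧ e0 ≤ 65535 ∧ pvIv c = (s0, e0))
    ∨ (∃ p0, PySem.Str.isIn "-" c = false ∧ PySem.Int.ofStr? c = some p0 ∧
        1 ≤ p0 ∧ p0 ≤ 65535 ∧ pvIv c = (p0, p0)) := by
  unfold pvChunkOK at hc
  by_cases ht : PySem.Str.isIn "-" c = true
  · rw [if_pos ht] at hc
    rcases h0 : PySem.Int.ofStr? ((((PySem.Str.splitMax? c "-" 1).getD []).map PySem.Str.strip).getD 0 "") with _ | s0
    · rw [h0] at hc; exfalso; revert hc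
      cases PySem.Int.ofStr? ((((PySem.Str.splitMax? c "-" 1).getD []).map PySem.Str.strip).getD 1 "") <;> simp
    · rcases h1 : PySem.Int.ofStr? ((((PySem.Str.splitMax? c "-" 1).getD []).map PySem.Str.strip).getD 1 "") with _ | e0
      · rw [h0, h1] at hc; exfalso; revert hc; simp
      · rw [h0, h1] at hc
        simp only [Bool.and_eq_true, decide_eq_true_eq] at hc
        obtain ⟨⟨⟨hl, hn0⟩, hn1⟩, hb⟩ := hc
        have hp : ¬ ((((PySem.Str.splitMax? c "-" 1).getD []).map PySem.Str.strip).length ≠ 2 ∨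
            (((PySem.Str.splitMax? c "-" 1).getD []).map PySem.Str.strip).getD 0 "" = "" ∨
            (((PySem.Str.splitMax? c "-" 1).getD []).map PySem.Str.strip).getD 1 "" = "") := by
          push_neg
          exact ⟨hl, by simpa using hn0, by simpa using hn1⟩
        have hIv : pvIv c = (s0, e0) := by
          unfold pvIv; rw [if_pos ht, h0, h1]; rfl
        refine Or.inl ⟨s0, e0, ht, hp, ?_, ?_, by omega, by omega, by omega, hIv⟩
        · rfl
        · rfl
  · have htf : PySem.Str.isIn "-" c = false := by
      rwa [Bool.not_eq_true] at ht
    rw [if_neg ht] at hc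
    rcases h0 : PySem.Int.ofStr? c with _ | p0
    · rw [h0] at hc; exact absurd hc (by simp)
    · rw [h0] at hc
      simp only [Bool.and_eq_true, decide_eq_true_eq] at hc
      have hIv : pvIv c = (p0, p0) := by
        unfold pvIv; rw [if_neg ht, h0]; rfl
      refine Or.inr ⟨p0, htf, ?_, hc.1, hc.2, hIv⟩
      rfl

theorem pvIv_bounds {c : String} (hc : pvChunkOK c = true) :
    1 ≤ (pvIv c).1 ∧ (pvIv c).1 ≤ (pvIv c).2 ∧ (pvIv c).2 ≤ 65535 := by
  rcases pvChunkOK_elim hc with ⟨s0, e0, _, _, _, _, hb1, hb2, hb3, hIv⟩ | ⟨p0, _, _, hb1, hb2, hIv⟩ <;>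
    rw [hIv] <;> exact ⟨by omega, by omega, by omega⟩

-- a valid chunk's interval helper succeeds and returns pvIv
theorem pvChunkIv?_eq {c : String} (hc : pvChunkOK c = true) : pvChunkIv? c = some (pvIv c) := by
  rcases pvChunkOK_elim hc with
    ⟨s0, e0, ht, hparts, h0, h1, hb1, hb2, hb3, hIv⟩ | ⟨p0, ht, h0, hb1, hb2, hIv⟩
  · push_neg at hparts
    obtain ⟨_, hne0, hne1⟩ := hparts
    unfold pvChunkIv?
    rw [if_pos ht, pv_piece0 c ht, pv_piece1 c ht, h0, h1]
    rw [if_neg (by push_neg; exact ⟨hne0, hne1⟩)]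
    have hgt : ¬ (s0 > e0) := by omega
    have hob : ¬ (s0 < 1 ∨ e0 > 65535) := by omega
    simp only [hgt, hob, ite_false]
    rw [hIv]
  · unfold pvChunkIv?
    rw [if_neg (by rw [ht]; simp), h0]
    have hob : ¬ (p0 < 1 ∨ p0 > 65535) := by omega
    simp only [hob, ite_false]
    rw [hIv]

-- the interval comprehension succeeds chunk-wise
theorem pv_mapM_ok (chunks : List String) (hok : ∀ c ∈ chunks, pvChunkOK c = true) :
    chunks.mapM pvChunkIv? = some (chunks.map pvIv) := by
  induction chunks with
  | nil => rfl
  | cons c rest ih =>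
    rw [List.mapM_cons, pvChunkIv?_eq (hok c (by simp)),
        ih (fun c' h' => hok c' (by simp [h']))]
    rfl

theorem pvLoopA_ok (chunks : List String) (s : PySem.Set Int)
    (hok : ∀ c ∈ chunks, pvChunkOK c = true) (hnd : s.Nodup) :
    ∃ S : PySem.Set Int, pvLoopA chunks s = some S ∧ S.Nodup ∧
      (∀ p : Int, p ∈ S ↔ p ∈ s ∨ ∃ c ∈ chunks, (pvIv c).1 ≤ p ∧ p ≤ (pvIv c).2) := by
  induction chunks generalizing s with
  | nil => exact ⟨s, rfl, hnd, by simp⟩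
  | cons c rest ih =>
    have hrest : ∀ c' ∈ rest, pvChunkOK c' = true := fun c' h' => hok c' (by simp [h'])
    rcases pvChunkOK_elim (hok c (by simp)) with
      ⟨s0, e0, ht, hparts, h0, h1, hb1, hb2, hb3, hIv⟩ | ⟨p0, ht, h0, hb1, hb2, hIv⟩
    · have hstep : pvLoopA (c :: rest) s
          = pvLoopA rest (PySem.Set.update s (PySem.List.pyRange s0 (e0 + 1) 1)) := by
        have hgt : ¬ (s0 > e0) := by omega
        have hob : ¬ (s0 < 1 ∨ e0 > 65535) := by omega
        conv_lhs => unfold pvLoopA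
        rw [if_pos ht, if_neg hparts, h0, h1]
        simp only [hgt, hob, ite_false]
      obtain ⟨S, hS, hSnd, hSmem⟩ :=
        ih (PySem.Set.update s (PySem.List.pyRange s0 (e0 + 1) 1)) hrest
          (PySem.Set.nodup_update _ _ hnd)
      refine ⟨S, hstep ▸ hS, hSnd, fun p => ?_⟩
      rw [hSmem p]
      rw [PySem.Set.mem_update]
      simp only [List.mem_cons, PySem.List.mem_pyRange_one]
      constructor
      · rintro ((h | h) | ⟨c', hc', h⟩)
        · exact Or.inl h
        · exact Or.inr ⟨c, Or.inl rfl, by rw [hIv]; constructor <;> omega⟩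
        · exact Or.inr ⟨c', Or.inr hc', h⟩
      · rintro (h | ⟨c', hc' | hc', h⟩)
        · exact Or.inl (Or.inl h)
        · rw [hc', hIv] at h; exact Or.inl (Or.inr (by omega))
        · exact Or.inr ⟨c', hc', h⟩
    · have hstep : pvLoopA (c :: rest) s = pvLoopA rest (PySem.Set.add s p0) := by
        have hob : ¬ (p0 < 1 ∨ p0 > 65535) := by omega
        conv_lhs => unfold pvLoopA
        rw [if_neg (by rw [ht]; simp), h0]
        simp only [hob, ite_false]
      obtain ⟨S, hS, hSnd, hSmem⟩ := ih (PySem.Set.add s p0) hrest (PySem.Set.nodup_add _ _ hnd)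
      refine ⟨S, hstep ▸ hS, hSnd, fun p => ?_⟩
      rw [hSmem p]
      rw [PySem.Set.mem_add]
      simp only [List.mem_cons]
      constructor
      · rintro ((h | h) | ⟨c', hc', h⟩)
        · exact Or.inl h
        · exact Or.inr ⟨c, Or.inl rfl, by rw [hIv, h]; constructor <;> omega⟩
        · exact Or.inr ⟨c', Or.inr hc', h⟩
      · rintro (h | ⟨c', hc' | hc', h⟩)
        · exact Or.inl (Or.inl h)
        · rw [hc', hIv] at h; exact Or.inl (Or.inr (by omega))
        · exact Or.inr ⟨c', hc', h⟩

theorem pvMergeB_spec (t : List (Int × Int)) (cs ce : Int) (out : List Int)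
    (h1 : cs ≤ ce)
    (h2 : ∀ iv ∈ t, cs ≤ iv.1 ∧ iv.1 ≤ iv.2)
    (h3 : t.Pairwise (fun I J => I.1 ≤ J.1))
    (h4 : out.Pairwise (· < ·))
    (h5 : ∀ x ∈ out, x < cs) :
    (pvMergeB t cs ce out).Pairwise (· < ·) ∧
    (∀ p : Int, p ∈ pvMergeB t cs ce out ↔
      p ∈ out ∨ (cs ≤ p ∧ p ≤ ce) ∨ ∃ iv ∈ t, iv.1 ≤ p ∧ p ≤ iv.2) := by
  induction t generalizing cs ce out with
  | nil =>
    unfold pvMergeB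
    constructor
    · refine List.pairwise_append.mpr ⟨h4, PySem.List.pairwise_lt_pyRange_one _ _, ?_⟩
      intro x hx y hy
      have := (PySem.List.mem_pyRange_one.mp hy).1
      have := h5 x hx
      omega
    · intro p
      simp only [List.mem_append, PySem.List.mem_pyRange_one, List.not_mem_nil,
        false_and, exists_false, or_false]
      constructor
      · rintro (h | h)
        · exact Or.inl h
        · exact Or.inr (by omega)
      · rintro (h | h)
        · exact Or.inl h
        · exact Or.inr (by omega)
  | cons hd t ih =>
    obtain ⟨a, b⟩ := hd
    have hha : cs ≤ a ∧ a ≤ b := h2 (a, b) (by simp)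
    have h2t : ∀ iv ∈ t, cs ≤ iv.1 ∧ iv.1 ≤ iv.2 := fun iv h => h2 iv (by simp [h])
    have hhd : ∀ iv ∈ t, a ≤ iv.1 := fun iv h => (List.pairwise_cons.mp h3).1 iv h
    have h3t : t.Pairwise (fun I J => I.1 ≤ J.1) := (List.pairwise_cons.mp h3).2
    unfold pvMergeB
    by_cases hcase : a ≤ ce + 1
    · rw [if_pos hcase]
      have hce' : ce ≤ (if b > ce then b else ce) := by split <;> omega
      obtain ⟨pw, hm⟩ := ih cs (if b > ce then b else ce) out (by omega) h2t h3t h4 h5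
      refine ⟨pw, fun p => ?_⟩
      rw [hm p]
      simp only [List.mem_cons]
      constructor
      · rintro (h | h | ⟨iv, hiv, h⟩)
        · exact Or.inl h
        · by_cases hp : p ≤ ce
          · exact Or.inr (Or.inl ⟨h.1, hp⟩)
          · refine Or.inr (Or.inr ⟨(a, b), Or.inl rfl, ?_⟩)
            revert h; split <;> intro h <;> constructor <;> omega
        · exact Or.inr (Or.inr ⟨iv, Or.inr hiv, h⟩)
      · rintro (h | h | ⟨iv, hiv | hiv, h⟩)
        · exact Or.inl h
        · exact Or.inr (Or.inl ⟨h.1, by omega⟩)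
        · rw [hiv] at h; simp only at h
          refine Or.inr (Or.inl ⟨by omega, ?_⟩)
          split <;> omega
        · exact Or.inr (Or.inr ⟨iv, hiv, h⟩)
    · rw [if_neg hcase]
      have h5' : ∀ x ∈ out ++ PySem.List.pyRange cs (ce + 1) 1, x < a := by
        intro x hx
        rcases List.mem_append.mp hx with h | h
        · have := h5 x h; omega
        · have := (PySem.List.mem_pyRange_one.mp h).2; omega
      have h4' : (out ++ PySem.List.pyRange cs (ce + 1) 1).Pairwise (· < ·) := by
        refine List.pairwise_append.mpr ⟨h4, PySem.List.pairwise_lt_pyRange_one _ _, ?_⟩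
        intro x hx y hy
        have := (PySem.List.mem_pyRange_one.mp hy).1
        have := h5 x hx
        omega
      obtain ⟨pw, hm⟩ := ih a b (out ++ PySem.List.pyRange cs (ce + 1) 1)
        (by omega) (fun iv h => ⟨hhd iv h, (h2t iv h).2⟩) h3t h4' h5'
      refine ⟨pw, fun p => ?_⟩
      rw [hm p]
      simp only [List.mem_append, List.mem_cons, PySem.List.mem_pyRange_one]
      constructor
      · rintro ((h | h) | h | ⟨iv, hiv, h⟩)
        · exact Or.inl h
        · exact Or.inr (Or.inl (by omega))
        · exact Or.inr (Or.inr ⟨(a, b), Or.inl rfl, h⟩)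
        · exact Or.inr (Or.inr ⟨iv, Or.inr hiv, h⟩)
      · rintro (h | h | ⟨iv, hiv | hiv, h⟩)
        · exact Or.inl (Or.inl h)
        · exact Or.inl (Or.inr (by omega))
        · rw [hiv] at h; exact Or.inr (Or.inl h)
        · exact Or.inr (Or.inr ⟨iv, hiv, h⟩)

-- ===== VERDICT (by name: the statement is the Claim_ definition above) =====
theorem parse_port_targets_spec : Claim_equal_parse_port_targets := by
  intro a b _ hPre
  unfold Spec_parse_port_targets parse_port_targets parse_port_targets_alt
  unfold Pre_parse_port_targets at hPre
  by_cases hT : PySem.Str.strip (a.getD "") ≠ ""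
  case neg =>
    rw [if_neg hT, if_neg hT]
  case pos =>
    rw [if_pos hT] at hPre ⊢
    rw [if_pos hT]
    simp only [Bool.and_eq_true, decide_eq_true_eq, List.all_eq_true] at hPre
    obtain ⟨hne, hall⟩ := hPre
    rw [if_neg hne, if_neg hne]
    obtain ⟨S, hS, hSnd, hSmem⟩ := pvLoopA_ok _ PySem.Set.empty hall List.nodup_nil
    rw [hS, pv_mapM_ok _ hall]
    set chunks := (((PySem.Str.split? (PySem.Str.strip (a.getD "")) ",").getD []).map PySem.Str.strip).filter (fun c => c ≠ "") with hchunks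
    set ivs := chunks.map pvIv with hivs
    have hivsne : ivs ≠ [] := by
      intro h
      exact hne (by simpa [hivs] using congrArg List.length h)
    rcases hsort : PySem.List.sorted ivs (fun iv => iv.1) false with _ | ⟨⟨cs, ce⟩, restIv⟩
    · exact absurd ((PySem.List.sorted_eq_nil_iff _ _ _).mp hsort) hivsne
    · have hperm : ((cs, ce) :: restIv).Perm ivs := hsort ▸ PySem.List.sorted_perm ivs (fun iv => iv.1) false
      have hmemivs : ∀ iv ∈ (cs, ce) :: restIv, 1 ≤ iv.1 ∧ iv.1 ≤ iv.2 ∧ iv.2 ≤ 65535 := by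
        intro iv hiv
        have : iv ∈ ivs := hperm.mem_iff.mp hiv
        obtain ⟨c, hc, hceq⟩ := List.mem_map.mp this
        exact hceq ▸ pvIv_bounds (hall c hc)
      have hpw : ((cs, ce) :: restIv).Pairwise (fun I J : Int × Int => I.1 ≤ J.1) := by
        have := PySem.List.sorted_pairwise ivs (fun iv : Int × Int => iv.1)
        rw [hsort] at this
        exact this
      obtain ⟨hmpw, hmmem⟩ := pvMergeB_spec restIv cs ce []
        (hmemivs (cs, ce) (by simp)).2.1
        (fun iv h => ⟨(List.pairwise_cons.mp hpw).1 iv h, (hmemivs iv (by simp [h])).2.1⟩)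
        (List.pairwise_cons.mp hpw).2
        List.Pairwise.nil
        (by simp)
      -- same members
      have hsame : ∀ p : Int, p ∈ pvMergeB restIv cs ce [] ↔ p ∈ S := by
        intro p
        rw [hmmem p, hSmem p]
        simp only [List.not_mem_nil, false_or]
        constructor
        · rintro (h | ⟨iv, hiv, h⟩)
          · have : (cs, ce) ∈ ivs := hperm.mem_iff.mp (by simp)
            obtain ⟨c, hc, hceq⟩ := List.mem_map.mp this
            exact Or.inr ⟨c, hc, by rw [hceq]; exact h⟩
          · have : iv ∈ ivs := hperm.mem_iff.mp (by simp [hiv])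
            obtain ⟨c, hc, hceq⟩ := List.mem_map.mp this
            exact Or.inr ⟨c, hc, by rw [hceq]; exact h⟩
        · rintro (h | ⟨c, hc, h⟩)
          · exact absurd h (List.not_mem_nil)
          · have : pvIv c ∈ (cs, ce) :: restIv := hperm.mem_iff.mpr (List.mem_map_of_mem hc)
            rcases List.mem_cons.mp this with hh | hh
            · rw [hh] at h; exact Or.inl h
            · exact Or.inr ⟨pvIv c, hh, h⟩
      have hSne : S ≠ [] := by
        intro h
        obtain ⟨c, hc⟩ := List.exists_mem_of_ne_nil chunks hne
        have : (pvIv c).1 ∈ S := (hSmem _).mpr (Or.inr ⟨c, hc, le_refl _, (pvIv_bounds (hall c hc)).2.1⟩)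
        rw [h] at this
        exact absurd this (List.not_mem_nil)
      have hfinal : PySem.List.sorted S (fun x => x) false = pvMergeB restIv cs ce [] := by
        apply PySem.List.sorted_eq_of_perm_of_pairwise_lt
        · exact (List.perm_ext_iff_of_nodup (hmpw.imp (fun h => ne_of_lt h)) hSnd).mpr hsame
        · exact hmpw
      have hMne : pvMergeB restIv cs ce [] ≠ [] := by
        rw [← hfinal]
        intro h
        exact hSne ((PySem.List.sorted_eq_nil_iff _ _ _).mp h)
      simp only [hsort]
      rw [hfinal, if_neg hMne]
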